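-- pv_equiv track=rewrite | github.com/balassit/improved-potato | microsoft/Max-Inserts-to-Obtain-String-Without-3-Consecutive.py | maxInserts
-- ===== SOURCE A (Python) =====
-- def maxInserts(s):
--     """
--     Time Complexity - O(n)
--     Space Complexity - O(1)
--     """
--     limit = 3
--     char = "a"
--     count = 0
--     cur = 0
--     # checking character count to the left across string
--     for v in s:
--         if v == char:
--             cur = cur + 1
--         else:
--             # update total with 2 'a' minus current number of 'a' in place
--             count = count + (limit - 1) - cur
--             cur = 0
--         if cur == limit:
--             return -1
--
--     # end needs to check to the right of last char
--     if s[:-1] == char: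
--         count = count + (limit - 1) - cur
--     else:
--         count = count + (limit - 1)
--     return count
-- ===== SOURCE B (Python) =====
-- def maxInserts(s):
--     # Closed form: each insertion slot (after each non-'a' char and at both string
--     # boundaries... equivalently 2 per non-'a' char plus 2 at the end, minus one per 'a').
--     if "aaa" in s:
--         return -1
--     na = s.count("a")
--     return 2 * (len(s) - na + 1) - na
-- ===== Notes on version B (the rewrite author's own statement) =====
-- stated objective: alternative
-- what changed: Replaces A's per-character state loop by a closed form: one substring test for a run of three 'a's plus a count of 'a's give the answer as 2*(len(s)-count+1)-count; the final trailing-run adjustment is the intended one.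
-- intended difference: On strings that end with 'a' (other than "aa" itself, and containing no run of three 'a's) A's final line `if s[:-1] == char` never fires (it compares all-but-the-last-character with the one-character string), so A adds 2 instead of 2 - cur and overcounts by the trailing run length; B returns the intended value (e.g. on the single-character string "a": A returns 2, B returns 1, since doubling the run is the only legal extension). — e.g. on maxInserts("a"): A returns 2, B returns 1
import Mathlib
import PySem

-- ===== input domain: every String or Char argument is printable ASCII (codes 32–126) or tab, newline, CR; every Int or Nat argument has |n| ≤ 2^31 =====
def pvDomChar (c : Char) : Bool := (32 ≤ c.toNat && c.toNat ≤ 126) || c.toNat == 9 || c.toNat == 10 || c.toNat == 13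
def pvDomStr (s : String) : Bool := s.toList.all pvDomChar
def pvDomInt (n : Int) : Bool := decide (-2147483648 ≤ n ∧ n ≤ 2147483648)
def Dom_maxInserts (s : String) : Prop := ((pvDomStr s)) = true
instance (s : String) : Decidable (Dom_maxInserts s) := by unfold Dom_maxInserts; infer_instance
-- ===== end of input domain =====

-- B replaces A's per-character loop by a closed form (substring test + character count);
-- outside D_ below the two return the same value, which is what is proved here.

-- ===== PORT A =====
-- A's for-loop: state (count, cur); `none` models the early `return -1`
def maxInsertsLoop : List Char → Int → Int → Option (Int × Int)
  | [], count, cur => some (count, cur)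
  | v :: rest, count, cur =>
    let st := if v = 'a' then (count, cur + 1) else (count + (3 - 1) - cur, 0)
    if st.2 = 3 then none else maxInsertsLoop rest st.1 st.2

def maxInserts (s : String) : Int :=
  match maxInsertsLoop s.toList 0 0 with
  | none => -1
  | some (count, cur) =>
    -- `if s[:-1] == char:` — s[:-1] compared with the one-character string "a"
    if PySem.Chars.slice s.toList none (some (-1)) = ['a'] then count + (3 - 1) - cur
    else count + (3 - 1)

-- ===== PORT B =====
def maxInserts_alt (s : String) : Int :=
  if PySem.Str.isIn "aaa" s then -1
  else
    let na : Int := PySem.Str.count s "a"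
    2 * (PySem.Str.len s - na + 1) - na

-- ===== PRECONDITION & SPEC =====
-- On strings that end with 'a' (other than "aa" itself, and containing no run of three
-- 'a's) A's final line `if s[:-1] == char` never fires — it compares all-but-the-last-
-- character with the one-character string — so A adds 2 instead of 2 - cur and overcounts
-- by the trailing run length; B returns the intended value (on the one-character string
-- of a single 'a', A returns 2 while B returns 1: doubling the run is the only extension).
def D_maxInserts (s : String) : Prop :=
  s.toList.getLast? = some 'a' ∧ s ≠ "aa" ∧ ¬ (['a', 'a', 'a'] <:+: s.toList)
instance (s : String) : Decidable (D_maxInserts s) := by unfold D_maxInserts; infer_instance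

def Spec_maxInserts (s : String) (out : Int) : Prop := ¬ D_maxInserts s → out = maxInserts_alt s
instance (s : String) (out : Int) : Decidable (Spec_maxInserts s out) := by unfold Spec_maxInserts; infer_instance

def pvDiffWitness_maxInserts : String := "a"
def pvDiffWitnessOut_maxInserts : Int × Int := (2, 1)

-- ===== CLAIM (what is proved, stated in full; the proofs are below) =====
def Claim_unchanged_maxInserts : Prop := ∀ (s : String), Dom_maxInserts s → Spec_maxInserts s (maxInserts s)
def Claim_changed_maxInserts : Prop := Dom_maxInserts (pvDiffWitness_maxInserts) ∧ D_maxInserts (pvDiffWitness_maxInserts) ∧ maxInserts (pvDiffWitness_maxInserts) = pvDiffWitnessOut_maxInserts.1 ∧ maxInserts_alt (pvDiffWitness_maxInserts) = pvDiffWitnessOut_maxInserts.2 ∧ pvDiffWitnessOut_maxInserts.1 ≠ pvDiffWitnessOut_maxInserts.2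
def Claim_exact_maxInserts : Prop := ∀ (s : String), Dom_maxInserts s → D_maxInserts s → maxInserts s ≠ maxInserts_alt s

-- ===== LEMMAS AND PROOFS =====

-- abstract versions of the two components of the loop state (run counter as a Nat)
def badH : Nat → List Char → Bool
  | _, [] => false
  | k, v :: t => (if v = 'a' then k + 1 else 0) == 3 || badH (if v = 'a' then k + 1 else 0) t

def trailH : Nat → List Char → Nat
  | k, [] => k
  | k, v :: t => trailH (if v = 'a' then k + 1 else 0) t

theorem cnt_go (l : List Char) (acc : Nat) :
    PySem.Chars.count.go ['a'] l.length l acc = acc + l.count 'a' := by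
  induction l generalizing acc with
  | nil => simp [PySem.Chars.count.go]
  | cons h t ih =>
    by_cases hh : h = 'a'
    · simp [PySem.Chars.count.go, List.isPrefixOf, hh, ih]; omega
    · simp [PySem.Chars.count.go, List.isPrefixOf, hh, ih, Ne.symm hh]

theorem cnt_singleton (l : List Char) : PySem.Chars.count l ['a'] = l.count 'a' := by
  simpa [PySem.Chars.count] using cnt_go l 0

theorem loop_eq (l : List Char) (count : Int) (k : Nat) :
    maxInsertsLoop l count (k : Int) =
      if badH k l then none
      else some (count + 2 * ((l.length : Int) - l.count 'a') - ((l.count 'a' : Int) + k - trailH k l),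
                 (trailH k l : Int)) := by
  induction l generalizing count k with
  | nil => simp [maxInsertsLoop, badH, trailH]
  | cons v t ih =>
    by_cases hv : v = 'a'
    · subst hv
      by_cases h3 : k + 1 = 3
      · have hk : (k : Int) + 1 = 3 := by exact_mod_cast h3
        simp [maxInsertsLoop, badH, hk, h3]
      · have hk : ¬ ((k : Int) + 1 = 3) := by
          intro h; exact h3 (by exact_mod_cast h)
        have hb : ((k + 1 == 3) : Bool) = false := by simp; omega
        have hcast : (((k + 1 : Nat) : Int)) = (k : Int) + 1 := by push_cast; ring
        simp only [maxInsertsLoop, ite_true, if_neg hk]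
        rw [← hcast, ih]
        simp only [badH, trailH, ite_true, hb, Bool.false_or,
          List.count_cons, List.length_cons]
        split
        · rfl
        · simp only [Option.some.injEq, Prod.mk.injEq]
          refine ⟨?_, trivial⟩
          push_cast
          simp only [if_true]
          omega
    · have hb0 : ((0 == 3) : Bool) = false := by simp
      simp only [maxInsertsLoop, if_neg hv]
      rw [if_neg (by norm_num : ¬ ((0 : Int) = 3))]
      rw [show (0 : Int) = ((0 : Nat) : Int) from rfl, ih]
      simp only [badH, trailH, if_neg hv, hb0, Bool.false_or,
        List.count_cons, List.length_cons]
      split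
      · rfl
      · simp only [Option.some.injEq, Prod.mk.injEq]
        refine ⟨?_, trivial⟩
        push_cast
        simp [hv]
        omega

theorem skip_block (k : Nat) (hk : k ≤ 2) (v : Char) (hv : ¬ v = 'a') (t : List Char) :
    (∃ j, ['a','a','a'] <+: (List.replicate k 'a' ++ v :: t).drop j) ↔
    (∃ j, ['a','a','a'] <+: t.drop j) := by
  constructor
  · rintro ⟨j, h⟩
    rcases Nat.lt_or_ge j (k + 1) with hj | hj
    · exfalso
      obtain ⟨r, hr⟩ := h
      have hbound : k - j < ((List.replicate k 'a' ++ v :: t).drop j).length := by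
        rw [← hr]; simp; omega
      have step1 : ((List.replicate k 'a' ++ v :: t).drop j)[k - j]'hbound = v := by
        have hjk : j + (k - j) = k := by omega
        rw [List.getElem_drop]
        simp only [hjk]
        rw [List.getElem_append_right (by simp)]
        simp
      have step2 : ((List.replicate k 'a' ++ v :: t).drop j)[k - j]'hbound = 'a' := by
        have h2 : k - j < (List.replicate 3 'a' ++ r).length := by simp; omega
        have e2 : (List.replicate 3 'a' ++ r)[k - j]'h2 = 'a' := by
          rw [List.getElem_append_left (by simp; omega)]
          exact List.getElem_replicate _
        exact (List.getElem_of_eq hr.symm hbound).trans e2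
      exact hv (step1 ▸ step2)
    · refine ⟨j - (k + 1), ?_⟩
      have e : (List.replicate k 'a' ++ v :: t) = (List.replicate k 'a' ++ [v]) ++ t := by simp
      have hdrop : (List.replicate k 'a' ++ v :: t).drop j = t.drop (j - (k + 1)) := by
        have hda := List.drop_length_add_append (l₁ := List.replicate k 'a' ++ [v]) (l₂ := t) (j - (k + 1))
        rw [show (List.replicate k 'a' ++ [v]).length + (j - (k + 1)) = j by simp; omega] at hda
        rw [e]
        exact hda
      rwa [hdrop] at h
  · rintro ⟨j, h⟩
    refine ⟨(k + 1) + j, ?_⟩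
    have e : (List.replicate k 'a' ++ v :: t) = (List.replicate k 'a' ++ [v]) ++ t := by simp
    have hda := List.drop_length_add_append (l₁ := List.replicate k 'a' ++ [v]) (l₂ := t) j
    rw [show (List.replicate k 'a' ++ [v]).length + j = (k + 1) + j by simp] at hda
    rw [e, hda]
    exact h

theorem badA (l : List Char) : ∀ (k : Nat), k ≤ 2 →
    (badH k l = true ↔ ∃ j, ['a','a','a'] <+: (List.replicate k 'a' ++ l).drop j) := by
  induction l with
  | nil =>
    intro k hk
    simp only [badH, Bool.false_eq_true, false_iff, not_exists]
    intro j h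
    have := h.length_le
    simp at this
    omega
  | cons v t ih =>
    intro k hk
    by_cases hv : v = 'a'
    · subst hv
      by_cases h3 : k + 1 = 3
      · have hk2 : k = 2 := by omega
        subst hk2
        simp only [badH, ite_true]
        constructor
        · intro _
          exact ⟨0, ⟨t, rfl⟩⟩
        · intro _; simp
      · have hb : ((k + 1 == 3) : Bool) = false := by simp; omega
        have he : List.replicate k 'a' ++ 'a' :: t = List.replicate (k + 1) 'a' ++ t := by
          rw [List.replicate_succ']
          simp
        simp only [badH, ite_true, hb, Bool.false_or, he]
        exact ih (k + 1) (by omega)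
    · have hb0 : ((0 == 3) : Bool) = false := by simp
      simp only [badH, if_neg hv, hb0, Bool.false_or]
      rw [skip_block k hk v hv t]
      simpa using ih 0 (by omega)

theorem bad_iff_infix (l : List Char) : badH 0 l = true ↔ ['a','a','a'] <:+: l := by
  rw [badA l 0 (by omega)]
  simp only [List.replicate_zero, List.nil_append]
  rw [PySem.Chars.exists_prefix_drop_iff_isIn]
  exact PySem.Chars.isIn_iff_infix _ _

theorem trail_ne (l : List Char) : ∀ (k : Nat), l ≠ [] → l.getLast? ≠ some 'a' → trailH k l = 0 := by
  induction l with
  | nil => intro k h _; exact absurd rfl h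
  | cons v t ih =>
    intro k _ hlast
    match t, ih with
    | [], _ =>
      have hv : ¬ v = 'a' := by simpa using hlast
      simp [trailH, hv]
    | w :: t', ih =>
      simp only [trailH]
      exact ih _ (by simp) (by simpa [List.getLast?_cons_cons] using hlast)

theorem trail_pos (l : List Char) : ∀ (k : Nat), l.getLast? = some 'a' → 1 ≤ trailH k l := by
  induction l with
  | nil => intro k h; simp at h
  | cons v t ih =>
    intro k hlast
    match t, ih with
    | [], _ =>
      have hv : v = 'a' := by simpa using hlast
      simp [trailH, hv]
    | w :: t', ih =>
      simp only [trailH]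
      exact ih _ (by simpa [List.getLast?_cons_cons] using hlast)

theorem isIn_aaa (s : String) : PySem.Str.isIn "aaa" s = true ↔ ['a','a','a'] <:+: s.toList := by
  rw [PySem.Str.isIn_iff_infix]
  have : "aaa".toList = ['a','a','a'] := by decide
  rw [this]

theorem alt_no_aaa (s : String) (hin : ¬ ['a','a','a'] <:+: s.toList) :
    maxInserts_alt s =
      2 * ((s.toList.length : Int) - s.toList.count 'a' + 1) - s.toList.count 'a' := by
  have hB : PySem.Str.isIn "aaa" s = false := by
    rw [Bool.eq_false_iff]
    intro h; exact hin ((isIn_aaa s).mp h)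
  have hcnt : PySem.Str.count s "a" = s.toList.count 'a' := by
    rw [PySem.Str.count_eq]
    have : "a".toList = ['a'] := by decide
    rw [this, cnt_singleton]
  simp only [maxInserts_alt, hB, Bool.false_eq_true, if_false, hcnt, PySem.Str.len_eq]

theorem a_no_aaa (s : String) (hin : ¬ ['a','a','a'] <:+: s.toList) :
    maxInserts s =
      (if PySem.Chars.slice s.toList none (some (-1)) = ['a']
       then (2 * ((s.toList.length : Int) - s.toList.count 'a')
              - ((s.toList.count 'a' : Int) - trailH 0 s.toList)) + 2 - trailH 0 s.toList
       else (2 * ((s.toList.length : Int) - s.toList.count 'a')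
              - ((s.toList.count 'a' : Int) - trailH 0 s.toList)) + 2) := by
  have hbad : badH 0 s.toList = false := by
    rw [Bool.eq_false_iff]
    intro h; exact hin ((bad_iff_infix s.toList).mp h)
  unfold maxInserts
  rw [show (0 : Int) = ((0 : Nat) : Int) from rfl, loop_eq, if_neg (by simp [hbad])]
  simp only []
  split <;> push_cast <;> ring

theorem maxInserts_spec : Claim_unchanged_maxInserts := by
  intro s _ hnD
  show maxInserts s = maxInserts_alt s
  by_cases hin : ['a','a','a'] <:+: s.toList
  · have hbad : badH 0 s.toList = true := (bad_iff_infix s.toList).mpr hin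
    have hA : maxInserts s = -1 := by
      unfold maxInserts
      rw [show (0 : Int) = ((0 : Nat) : Int) from rfl, loop_eq, if_pos hbad]
    have hB : maxInserts_alt s = -1 := by
      unfold maxInserts_alt
      rw [if_pos ((isIn_aaa s).mpr hin)]
    rw [hA, hB]
  · rcases Decidable.em (s = "aa") with haa | haa
    · subst haa; decide
    · have hlast : s.toList.getLast? ≠ some 'a' := by
        intro h
        exact hnD ⟨h, haa, hin⟩
      have htr : trailH 0 s.toList = 0 := by
        cases hl : s.toList with
        | nil => rfl
        | cons v t => rw [← hl]; exact trail_ne s.toList 0 (by simp [hl]) hlast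
      rw [a_no_aaa s hin, alt_no_aaa s hin, htr]
      split <;> push_cast <;> ring

theorem maxInserts_changed : Claim_changed_maxInserts := by
  unfold Claim_changed_maxInserts; decide

theorem maxInserts_tight : Claim_exact_maxInserts := by
  intro s _ hD
  obtain ⟨hlast, hne, hin⟩ := hD
  have htr : 1 ≤ trailH 0 s.toList := trail_pos s.toList 0 hlast
  have hguard : ¬ (PySem.Chars.slice s.toList none (some (-1)) = ['a']) := by
    intro h
    rw [PySem.Chars.slice_eq_listSlice, PySem.List.slice_to_neg_one] at h
    -- dropLast s.toList = ['a'] and last = 'a' forces s = "aa"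
    have hnil : s.toList ≠ [] := by
      intro h0; rw [h0] at hlast; simp at hlast
    have hlst := List.dropLast_concat_getLast hnil
    have hlc : s.toList.getLast hnil = 'a' := by
      have := List.getLast?_eq_some_getLast (l := s.toList) hnil
      rw [hlast] at this
      exact (Option.some.injEq _ _ ▸ this.symm)
    have : s.toList = ['a', 'a'] := by
      rw [← hlst, h, hlc]
      rfl
    exact hne (by
      have h2 : s.toList = "aa".toList := by rw [this]; decide
      exact String.toList_inj.mp h2)
  rw [a_no_aaa s hin, alt_no_aaa s hin, if_neg hguard]
  intro hEq
  omega
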